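-- pv_equiv track=rewrite | github.com/ktnguyen10/Binary_Materials_Prediction | myCSPfunctions.py | foo
-- ===== SOURCE A (Python) =====
-- def foo(s):
--     ret = ""
--     i = True  # capitalize
--     for char in s:
--         if i:
--             ret += char.upper()
--         else:
--             ret += char.lower()
--         if char != ' ':
--             i = not i
--     return ret
-- ===== SOURCE B (Python) =====
-- def foo(s):
--     ns = [c for c in s if c != ' ']
--     trans = [c.upper() if i % 2 == 0 else c.lower() for i, c in enumerate(ns)]
--     it = iter(trans)
--     return ''.join(' ' if c == ' ' else next(it) for c in s)
-- ===== Notes on version B (the rewrite author's own statement) =====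
-- stated objective: alternative
-- what changed: Replaces the fused toggle-flag loop with a three-stage pipeline: filter out spaces, case-map the remaining characters by index parity, then reinterleave them with the literal spaces of the original string.
import Mathlib
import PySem

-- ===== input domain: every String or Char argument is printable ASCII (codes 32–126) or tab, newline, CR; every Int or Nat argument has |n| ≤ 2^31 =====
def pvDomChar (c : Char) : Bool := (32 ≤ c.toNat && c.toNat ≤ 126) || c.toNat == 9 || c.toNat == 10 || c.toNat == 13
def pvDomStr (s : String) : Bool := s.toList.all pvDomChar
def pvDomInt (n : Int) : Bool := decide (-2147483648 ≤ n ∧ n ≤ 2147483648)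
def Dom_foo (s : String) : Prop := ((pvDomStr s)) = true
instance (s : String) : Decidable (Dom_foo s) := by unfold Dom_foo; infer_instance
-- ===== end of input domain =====

-- B restructures A's fused toggle loop into filter → index-parity case-map → reinterleave with spaces (alternative decomposition, same cost).

-- ===== PORT A =====
-- one fused loop: accumulate ret and the toggle flag i
def foo (s : String) : String :=
  let r := s.toList.foldl
    (fun (p : List Char × Bool) char =>
      (p.1 ++ [if p.2 then PySem.Chars.upperChar char else PySem.Chars.lowerChar char],
       if char ≠ ' ' then !p.2 else p.2))
    ([], true)
  String.ofList r.1

-- ===== PORT B =====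
-- the parity-map comprehension '[c.upper() if i % 2 == 0 else c.lower() for i, c in enumerate(ns)]'
def fooTrans : List Char → Nat → List Char
  | [], _ => []
  | c :: rest, i =>
      (if i % 2 = 0 then PySem.Chars.upperChar c else PySem.Chars.lowerChar c) :: fooTrans rest (i + 1)

-- the join-generator: a space stays a space, otherwise pull next(it) from the transformed list
def fooWeave : List Char → List Char → List Char
  | [], _ => []
  | c :: rest, ts =>
      if c = ' ' then ' ' :: fooWeave rest ts
      else match ts with
           | t :: ts' => t :: fooWeave rest ts'
           | [] => []   -- iterator exhausted: unreachable, trans has one entry per non-space char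

def foo_alt (s : String) : String :=
  let ns := s.toList.filter (fun c => c ≠ ' ')
  let trans := fooTrans ns 0
  String.ofList (fooWeave s.toList trans)

-- ===== PRECONDITION & SPEC =====
def Spec_foo (s : String) (out : String) : Prop := out = foo_alt s
instance (s : String) (out : String) : Decidable (Spec_foo s out) := by unfold Spec_foo; infer_instance

-- ===== CLAIM (what is proved, stated in full; the proofs are below) =====
def Claim_equal_foo : Prop := ∀ (s : String), Dom_foo s → Spec_foo s (foo s)

-- ===== LEMMAS AND PROOFS =====

theorem upperChar_space : PySem.Chars.upperChar ' ' = ' ' := by decide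
theorem lowerChar_space : PySem.Chars.lowerChar ' ' = ' ' := by decide

-- loop invariant: A's toggle flag equals the parity of the count of non-space chars consumed so far
theorem foo_loop_eq (cs : List Char) (acc : List Char) (b : Bool) (n : Nat)
    (hb : b = decide (n % 2 = 0)) :
    (cs.foldl
      (fun (p : List Char × Bool) char =>
        (p.1 ++ [if p.2 then PySem.Chars.upperChar char else PySem.Chars.lowerChar char],
         if char ≠ ' ' then !p.2 else p.2))
      (acc, b)).1
    = acc ++ fooWeave cs (fooTrans (cs.filter (fun c => c ≠ ' ')) n) := by
  induction cs generalizing acc b n with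
  | nil => simp [fooWeave]
  | cons c rest ih =>
    by_cases hc : c = ' '
    · subst hc
      have hflag : (if (' ' ≠ ' ') then !b else b) = b := by simp
      simp only [List.foldl_cons, hflag, List.filter_cons]
      rw [ih (acc ++ [if b then PySem.Chars.upperChar ' ' else PySem.Chars.lowerChar ' ']) b n hb]
      simp [fooWeave, upperChar_space, lowerChar_space, List.append_assoc]
    · have hflag : (if (c ≠ ' ') then !b else b) = !b := by simp [hc]
      have hhead : (if b then PySem.Chars.upperChar c else PySem.Chars.lowerChar c)
          = (if n % 2 = 0 then PySem.Chars.upperChar c else PySem.Chars.lowerChar c) := by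
        subst hb; by_cases h : n % 2 = 0 <;> simp [h]
      have hb' : (!b) = decide ((n + 1) % 2 = 0) := by
        subst hb; rcases Nat.mod_two_eq_zero_or_one n with h | h <;> simp [h, Nat.add_mod]
      simp only [List.foldl_cons, hflag, List.filter_cons, if_pos (by simp [hc] : decide (c ≠ ' ') = true)]
      rw [ih (acc ++ [if b then PySem.Chars.upperChar c else PySem.Chars.lowerChar c]) (!b) (n + 1) hb']
      simp [fooWeave, hc, fooTrans, hhead, List.append_assoc]

-- ===== VERDICT (by name: the statement is the Claim_ definition above) =====
theorem foo_spec : Claim_equal_foo := by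
  intro s _
  unfold Spec_foo foo foo_alt
  simp only
  rw [foo_loop_eq s.toList [] true 0 (by decide)]
  simp
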